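-- pv_equiv track=rewrite | github.com/8igMac/bert_ner | src/acc_count.py | FullTags
-- ===== SOURCE A (Python) =====
-- def FullTags(tags):
--     state = 0
--     count = 0
--     for tag in tags:
--         if state == 0:
--             if tag[0] == "S":
--                 count += 1
--                 state = 0
--             elif tag[0] == "B":
--                 state = 1
--             else:
--                 state = 0
--         elif state == 1:
--             if tag[0] == "I":
--                 state = 1
--             elif tag[0] == "E":
--                 count += 1
--                 state = 0
--             else:
--                 state = 0
--     return count
-- ===== SOURCE B (Python) =====
-- def FullTags(tags):
--     n = len(tags)
--     i = 0
--     count = 0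
--     while i < n:
--         c = tags[i][0]
--         if c == "S":
--             count += 1
--             i += 1
--         elif c == "B":
--             i += 1
--             while i < n and tags[i][0] == "I":
--                 i += 1
--             if i < n:
--                 if tags[i][0] == "E":
--                     count += 1
--                 i += 1
--         else:
--             i += 1
--     return count
-- ===== Notes on version B (the rewrite author's own statement) =====
-- stated objective: alternative
-- what changed: Replaces the flat per-tag state-machine (state variable 0/1) with an index-driven loop that consumes each B..I*..terminator span as a unit via a nested inner loop.
-- outside the precondition, e.g. on FullTags(['', 'S-x']): A raises IndexError, B raises IndexError
import Mathlib
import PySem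

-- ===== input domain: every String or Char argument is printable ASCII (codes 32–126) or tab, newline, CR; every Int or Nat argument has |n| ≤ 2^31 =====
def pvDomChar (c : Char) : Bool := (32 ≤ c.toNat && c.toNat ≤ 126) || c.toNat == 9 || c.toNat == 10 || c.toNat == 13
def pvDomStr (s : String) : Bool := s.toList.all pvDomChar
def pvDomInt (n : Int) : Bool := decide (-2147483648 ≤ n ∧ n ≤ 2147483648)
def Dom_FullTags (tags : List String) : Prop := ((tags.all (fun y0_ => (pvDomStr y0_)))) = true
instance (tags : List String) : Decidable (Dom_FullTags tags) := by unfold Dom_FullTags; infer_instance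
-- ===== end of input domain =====

-- B replaces A's flat per-tag state machine with an index-driven loop that consumes
-- each span as a unit (objective: alternative decomposition, same O(n) cost).

-- tag[0]: Python raises IndexError on "" — Pre_ excludes empty strings, so getD is unreached inside Pre_
def pyFirst (s : String) : Char := (PySem.Str.pyGet? s 0).getD ' '

-- ===== PORT A =====
def aStep (p : Int × Int) (tag : String) : Int × Int :=
  if p.1 = 0 then
    if pyFirst tag = 'S' then (0, p.2 + 1)
    else if pyFirst tag = 'B' then (1, p.2)
    else (0, p.2)
  else if p.1 = 1 then
    if pyFirst tag = 'I' then (1, p.2)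
    else if pyFirst tag = 'E' then (0, p.2 + 1)
    else (0, p.2)
  else p

def FullTags (tags : List String) : Int :=
  (tags.foldl aStep (0, 0)).2

-- ===== PORT B =====
-- the inner `while i < n and tags[i][0] == 'I'` plus the terminator consumption:
-- returns (1 if the span closed with 'E' else 0, remaining suffix after the consumed span tail)
def altSpanTail : List String → Int × List String
  | [] => (0, [])
  | u :: r =>
    if pyFirst u = 'I' then altSpanTail r
    else ((if pyFirst u = 'E' then 1 else 0), r)

theorem altSpanTail_len (l : List String) : (altSpanTail l).2.length ≤ l.length := by
  induction l with
  | nil => simp [altSpanTail]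
  | cons u r ih =>
    simp only [altSpanTail]
    split
    · exact le_trans ih (by simp)
    · simp

def altGo : List String → Int
  | [] => 0
  | t :: rest =>
    if pyFirst t = 'S' then altGo rest + 1
    else if pyFirst t = 'B' then
      (altSpanTail rest).1 + altGo (altSpanTail rest).2
    else altGo rest
termination_by l => l.length
decreasing_by
  · simp
  · exact Nat.lt_succ_of_le (altSpanTail_len rest)
  · simp

def FullTags_alt (tags : List String) : Int := altGo tags

-- ===== PRECONDITION & SPEC =====
-- Pre_ excludes lists containing an empty string: tag[0] raises IndexError in both A and B there.
def Pre_FullTags (tags : List String) : Prop := ∀ t ∈ tags, t ≠ ""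
instance (tags : List String) : Decidable (Pre_FullTags tags) := by unfold Pre_FullTags; infer_instance
def pvWitness_FullTags : List String := (["B-x", "I-x", "E-x", "S-y", "O"])

def Spec_FullTags (tags : List String) (out : Int) : Prop := out = FullTags_alt tags
instance (tags : List String) (out : Int) : Decidable (Spec_FullTags tags out) := by unfold Spec_FullTags; infer_instance

-- ===== CLAIM (what is proved, stated in full; the proofs are below) =====
def Claim_equal_FullTags : Prop := ∀ (tags : List String), Dom_FullTags tags → Pre_FullTags tags → Spec_FullTags tags (FullTags tags)

-- ===== LEMMAS AND PROOFS =====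

-- In state 1 (inside a span), A's fold consumes exactly the tags that B's altSpanTail consumes,
-- adds its count increment, and resumes in state 0 on the remaining suffix.
theorem foldl_state1 (l : List String) : ∀ c : Int,
    (List.foldl aStep (1, c) l).2
      = (List.foldl aStep (0, c + (altSpanTail l).1) (altSpanTail l).2).2 := by
  induction l with
  | nil => simp [altSpanTail]
  | cons u r ih =>
    intro c
    by_cases hI : pyFirst u = 'I'
    · simp only [List.foldl_cons, aStep, hI, altSpanTail, if_true]
      simpa using ih c
    · by_cases hE : pyFirst u = 'E'
      · simp [List.foldl_cons, aStep, hE, altSpanTail]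
      · simp [List.foldl_cons, aStep, hI, hE, altSpanTail]

-- Starting in state 0 with accumulated count c, A's fold returns c + B's span count.
theorem foldl_state0 (l : List String) : ∀ c : Int,
    (List.foldl aStep (0, c) l).2 = c + altGo l := by
  induction l using altGo.induct with
  | case1 => simp [altGo]
  | case2 t rest hS ih =>
    intro c
    simp only [List.foldl_cons, aStep, hS, altGo, if_true]
    rw [ih (c + 1)]; ring
  | case3 t rest hS hB ih =>
    intro c
    rw [List.foldl_cons, show (aStep (0, c) t) = (1, c) from by simp [aStep, hB],
      foldl_state1, ih,
      show altGo (t :: rest) = (altSpanTail rest).1 + altGo (altSpanTail rest).2 from by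
        rw [altGo, if_neg hS, if_pos hB]]
    ring
  | case4 t rest hS hB ih =>
    intro c
    rw [List.foldl_cons, show (aStep (0, c) t) = (0, c) from by simp [aStep, hS, hB]]
    simp only [altGo, hS, hB, if_false]
    exact ih c

-- ===== VERDICT (by name: the statement is the Claim_ definition above) =====
theorem FullTags_spec : Claim_equal_FullTags := by
  intro tags _ _
  unfold Spec_FullTags FullTags FullTags_alt
  simpa using foldl_state0 tags 0
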